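-- pv_equiv track=rewrite | github.com/ZQuestClassic/ZQuestClassic | scripts/jit_runtime_debug.py | find_last_index_containing
-- ===== SOURCE A (Python) =====
-- def find_last_index_containing(lines, str, n):
--     count = 0
--     for i, line in reversed(list(enumerate(lines))):
--         if str in line:
--             if count == n:
--                 return i
--             count += 1
--
--     raise Exception(f'did not find {str}')
-- ===== SOURCE B (Python) =====
-- def find_last_index_containing(lines, str, n):
--     matches = [i for i, line in enumerate(lines) if str in line]
--     if n < 0 or n >= len(matches):
--         raise Exception(f'did not find {str}')
--     return matches[-1 - n]
-- ===== Notes on version B (the rewrite author's own statement) =====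
-- stated objective: simpler
-- what changed: Instead of a reverse scan with a running match counter, B builds the forward list of matching indices once and selects the n-th-from-last by arithmetic indexing (matches[-1-n]) after an explicit bounds check.
import Mathlib
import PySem

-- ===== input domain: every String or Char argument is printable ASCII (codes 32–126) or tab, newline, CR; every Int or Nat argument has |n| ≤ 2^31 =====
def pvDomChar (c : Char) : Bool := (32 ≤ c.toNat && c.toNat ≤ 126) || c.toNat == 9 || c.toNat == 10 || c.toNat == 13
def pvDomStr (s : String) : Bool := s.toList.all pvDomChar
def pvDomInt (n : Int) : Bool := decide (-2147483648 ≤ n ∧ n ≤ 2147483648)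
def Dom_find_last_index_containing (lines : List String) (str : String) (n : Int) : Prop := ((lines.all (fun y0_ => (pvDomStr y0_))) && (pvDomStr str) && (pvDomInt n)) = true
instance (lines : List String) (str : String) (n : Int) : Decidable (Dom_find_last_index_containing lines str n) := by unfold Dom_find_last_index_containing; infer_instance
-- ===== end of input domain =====

-- B replaces A's reverse scan with a running counter by a forward table of matching
-- indices selected arithmetically (matches[-1-n]); objective: simpler. Return-value
-- equivalence only; both raise outside Pre_.

-- ===== PORT A =====
-- A's loop over reversed(list(enumerate(lines))) with the running counter; none = the final raise.
def flicLoopA (str : String) (n : Int) : List (Int × String) → Int → Option Int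
  | [], _ => none
  | (i, line) :: rest, count =>
    if PySem.Str.isIn str line then
      (if count = n then some i else flicLoopA str n rest (count + 1))
    else flicLoopA str n rest count

def find_last_index_containing (lines : List String) (str : String) (n : Int) : Int :=
  (flicLoopA str n (PySem.List.enumerate lines).reverse 0).getD 0

-- ===== PORT B =====
def find_last_index_containing_alt (lines : List String) (str : String) (n : Int) : Int :=
  let ms := ((PySem.List.enumerate lines).filter (fun p => PySem.Str.isIn str p.2)).map (·.1)
  if n < 0 ∨ (ms.length : Int) ≤ n then 0  -- raise; outside Pre_
  else (PySem.List.pyGet? ms (-1 - n)).getD 0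

-- ===== PRECONDITION & SPEC =====
-- Pre_ excludes exactly the inputs on which A raises its Exception: n negative or
-- fewer than n+1 lines containing str.
def Pre_find_last_index_containing (lines : List String) (str : String) (n : Int) : Prop :=
  0 ≤ n ∧ n < ((lines.filter (fun l => PySem.Str.isIn str l)).length : Int)
instance (lines : List String) (str : String) (n : Int) : Decidable (Pre_find_last_index_containing lines str n) := by unfold Pre_find_last_index_containing; infer_instance

def pvWitness_find_last_index_containing : List String × String × Int := (["ab", "cd", "ab"], "a", 1)

def Spec_find_last_index_containing (lines : List String) (str : String) (n : Int) (out : Int) : Prop := out = find_last_index_containing_alt lines str n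
instance (lines : List String) (str : String) (n : Int) (out : Int) : Decidable (Spec_find_last_index_containing lines str n out) := by unfold Spec_find_last_index_containing; infer_instance

-- ===== CLAIM (what is proved, stated in full; the proofs are below) =====
def Claim_equal_find_last_index_containing : Prop := ∀ (lines : List String) (str : String) (n : Int), Dom_find_last_index_containing lines str n → Pre_find_last_index_containing lines str n → Spec_find_last_index_containing lines str n (find_last_index_containing lines str n)

-- ===== LEMMAS AND PROOFS =====

-- A's reverse scan with a counter = indexing into the (already reversed) match table.
lemma flicLoopA_eq (str : String) (n : Int) (xs : List (Int × String)) (count : Int) :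
    flicLoopA str n xs count =
      if n < count then none
      else ((xs.filter (fun p => PySem.Str.isIn str p.2)).map (·.1))[(n - count).toNat]? := by
  induction xs generalizing count with
  | nil => simp [flicLoopA]
  | cons hd tl ih =>
    obtain ⟨i, line⟩ := hd
    by_cases hin : PySem.Chars.isIn str.toList line.toList = true
    · by_cases hc : count = n
      · subst hc
        simp [flicLoopA, hin]
      · have hstep : flicLoopA str n ((i, line) :: tl) count = flicLoopA str n tl (count + 1) := by
          simp [flicLoopA, hin, hc]
        rw [hstep, ih]
        by_cases h : n < count
        · rw [if_pos (by omega), if_pos h]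
        · rw [if_neg (by omega), if_neg h]
          have hnc : (n - count).toNat = (n - (count + 1)).toNat + 1 := by omega
          simp [hin, hnc]
    · have hstep : flicLoopA str n ((i, line) :: tl) count = flicLoopA str n tl count := by
        simp [flicLoopA, hin]
      rw [hstep, ih]
      simp [hin]

-- the length of the filtered enumeration is independent of the start index
lemma length_filter_enumerate (lines : List String) (str : String) (s : Int) :
    ((PySem.List.enumerate lines s).filter (fun p => PySem.Str.isIn str p.2)).length
      = (lines.filter (fun l => PySem.Str.isIn str l)).length := by
  induction lines generalizing s with
  | nil => simp [PySem.List.enumerate]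
  | cons hd tl ih =>
    simp only [PySem.List.enumerate_cons, List.filter_cons]
    by_cases h : PySem.Chars.isIn str.toList hd.toList = true <;> simpa [h] using ih (s + 1)

-- ===== VERDICT (by name: the statement is the Claim_ definition above) =====
theorem find_last_index_containing_spec : Claim_equal_find_last_index_containing := by
  intro lines str n _ hpre
  obtain ⟨hn0, hn⟩ := hpre
  unfold Spec_find_last_index_containing
  simp only [find_last_index_containing, find_last_index_containing_alt]
  set ms := ((PySem.List.enumerate lines).filter (fun p => PySem.Str.isIn str p.2)).map (·.1) with hms
  have hlen : ms.length = (lines.filter (fun l => PySem.Str.isIn str l)).length := by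
    rw [hms, List.length_map, length_filter_enumerate lines str 0]
  rw [flicLoopA_eq, if_neg (by omega)]
  rw [List.filter_reverse, List.map_reverse, ← hms]
  have hnlt : n.toNat < ms.length := by omega
  simp only [Int.sub_zero]
  rw [List.getElem?_reverse hnlt]
  rw [if_neg (by omega)]
  have hneg : -1 - n = -(((n.toNat + 1 : Nat) : Int)) := by omega
  rw [hneg, PySem.List.pyGet?_neg_natCast ms (n.toNat + 1) (by omega) (by omega)]
  have hidx : ms.length - 1 - n.toNat = ms.length - (n.toNat + 1) := by omega
  rw [hidx]
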